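-- pv_equiv track=rewrite | github.com/jakedugi/corp_speech_risk_dataset | scripts/copy_all_missing_features.py | get_missing_features
-- ===== SOURCE A (Python) =====
-- from typing import Dict, Any, Set, Tuple, List
--
-- def get_missing_features(
--     binary_record: Dict[str, Any], tertile_record: Dict[str, Any]
-- ) -> Dict[str, Any]:
--     """Get all features present in binary but missing in tertile record."""
--     missing_features = {}
--
--     for key, value in binary_record.items():
--         # Skip metadata fields
--         if key in [
--             "case_id",
--             "doc_id",
--             "text",
--             "context",
--             "outcome_bin",
--             "sample_weight",
--         ]:
--             continue
--
--         # Copy missing features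
--         if key not in tertile_record:
--             missing_features[key] = value
--
--     return missing_features
-- ===== SOURCE B (Python) =====
-- METADATA_FIELDS = (
--     "case_id",
--     "doc_id",
--     "text",
--     "context",
--     "outcome_bin",
--     "sample_weight",
-- )
--
--
-- def get_missing_features(binary_record, tertile_record):
--     """Get all features present in binary but missing in tertile record."""
--     missing_features = dict(binary_record)
--     for key in (*METADATA_FIELDS, *tertile_record):
--         missing_features.pop(key, None)
--     return missing_features
-- ===== Notes on version B (the rewrite author's own statement) =====
-- stated objective: simpler
-- what changed: Instead of looping over every binary item with two membership branches, B copies the binary dict and then deletes the metadata keys and the tertile keys from the copy (subtraction by deletion).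
import Mathlib
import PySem

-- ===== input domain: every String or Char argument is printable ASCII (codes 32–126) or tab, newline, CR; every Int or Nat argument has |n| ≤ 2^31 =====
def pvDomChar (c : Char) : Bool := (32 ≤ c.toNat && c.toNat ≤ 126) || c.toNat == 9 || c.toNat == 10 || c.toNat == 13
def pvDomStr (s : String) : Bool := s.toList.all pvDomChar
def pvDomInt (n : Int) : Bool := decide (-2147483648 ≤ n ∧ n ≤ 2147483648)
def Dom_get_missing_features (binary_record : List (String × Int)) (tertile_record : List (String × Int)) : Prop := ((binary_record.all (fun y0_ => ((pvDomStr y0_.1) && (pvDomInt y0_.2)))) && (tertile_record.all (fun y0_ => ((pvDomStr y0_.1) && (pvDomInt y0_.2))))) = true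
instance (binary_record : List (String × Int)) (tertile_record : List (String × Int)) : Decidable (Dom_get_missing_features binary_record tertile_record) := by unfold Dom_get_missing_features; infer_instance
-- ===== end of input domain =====

-- B replaces A's per-item loop with two membership branches by copying the binary dict and
-- deleting the metadata keys and the tertile keys from the copy (simpler; return value only).

-- ===== PORT A =====
-- the metadata-field list A compares each key against
def pvMetaList : List String :=
  ["case_id", "doc_id", "text", "context", "outcome_bin", "sample_weight"]

def get_missing_features (binary_record : List (String × Int)) (tertile_record : List (String × Int)) : List (String × Int) :=
  (binary_record.foldl
    (fun missing kv =>
      if pvMetaList.contains kv.1 then missing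
      else if !(PySem.Dict.mk tertile_record).contains kv.1 then missing.insert kv.1 kv.2
      else missing)
    PySem.Dict.empty).items

-- ===== PORT B =====
def get_missing_features_alt (binary_record : List (String × Int)) (tertile_record : List (String × Int)) : List (String × Int) :=
  ((pvMetaList ++ tertile_record.map Prod.fst).foldl
    (fun missing key => missing.erase key)
    (PySem.Dict.ofList binary_record)).items

-- ===== PRECONDITION & SPEC =====
def Spec_get_missing_features (binary_record : List (String × Int)) (tertile_record : List (String × Int)) (out : List (String × Int)) : Prop := out = get_missing_features_alt binary_record tertile_record
instance (binary_record : List (String × Int)) (tertile_record : List (String × Int)) (out : List (String × Int)) : Decidable (Spec_get_missing_features binary_record tertile_record out) := by unfold Spec_get_missing_features; infer_instance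

-- ===== CLAIM (what is proved, stated in full; the proofs are below) =====
def Claim_equal_get_missing_features : Prop := ∀ (binary_record : List (String × Int)) (tertile_record : List (String × Int)), Dom_get_missing_features binary_record tertile_record → Spec_get_missing_features binary_record tertile_record (get_missing_features binary_record tertile_record)

-- ===== LEMMAS AND PROOFS =====

-- folding `erase` over a key list filters the items by those keys
theorem erase_foldl_items (K : List String) (d : PySem.Dict String Int) :
    (K.foldl (fun m k => m.erase k) d).items
      = d.items.filter (fun p => !K.contains p.1) := by
  induction K generalizing d with
  | nil => simp
  | cons k K ih =>
      rw [List.foldl_cons, ih (d.erase k)]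
      show (d.items.filter _).filter _ = _
      rw [List.filter_filter]
      apply List.filter_congr
      intro p _
      by_cases h : p.1 = k <;> simp [h]

-- A's two skip-branches are one `keep` test
theorem a_body_eq (t : List (String × Int)) :
    (fun (missing : PySem.Dict String Int) (kv : String × Int) =>
      if pvMetaList.contains kv.1 then missing
      else if !(PySem.Dict.mk t).contains kv.1 then missing.insert kv.1 kv.2
      else missing)
    = (fun missing kv =>
      if (!pvMetaList.contains kv.1 && !(PySem.Dict.mk t).contains kv.1) then missing.insert kv.1 kv.2
      else missing) := by
  funext missing kv
  by_cases h1 : pvMetaList.contains kv.1 = true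
  · rw [if_pos h1, h1, Bool.not_true, Bool.false_and, if_neg Bool.false_ne_true]
  · have h1' : pvMetaList.contains kv.1 = false := by
      cases hb : pvMetaList.contains kv.1
      · rfl
      · exact absurd hb h1
    rw [if_neg h1, h1', Bool.not_false, Bool.true_and]

-- a filtered dict contains a non-excluded key iff the full dict does
theorem contains_filter (keep : String → Bool) (l : List (String × Int)) (k : String)
    (hk : keep k = true) :
    ((l.filter (fun p => keep p.1)).any (fun p => p.1 == k)) = (l.any (fun p => p.1 == k)) := by
  induction l with
  | nil => rfl
  | cons x xs ih =>
      by_cases h : x.1 = k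
      · simp [h, hk]
      · by_cases hx : keep x.1 = true <;> simp [hx, h, ih]

-- core invariant: inserting only the kept pairs equals inserting all pairs then filtering
theorem insert_fold_filter (keep : String → Bool) (b : List (String × Int))
    (d d' : PySem.Dict String Int)
    (hrel : d'.items = d.items.filter (fun p => keep p.1)) :
    (b.foldl (fun m kv => if keep kv.1 then m.insert kv.1 kv.2 else m) d').items
      = (b.foldl (fun m kv => m.insert kv.1 kv.2) d).items.filter (fun p => keep p.1) := by
  induction b generalizing d d' with
  | nil => simpa using hrel
  | cons x xs ih =>
      simp only [List.foldl_cons]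
      by_cases hk : keep x.1 = true
      · simp only [hk, if_pos]
        apply ih
        have hc : d'.contains x.1 = d.contains x.1 := by
          simp only [PySem.Dict.contains, hrel]
          exact contains_filter keep d.items x.1 hk
        by_cases hcd : d.contains x.1 = true
        · simp only [PySem.Dict.insert, hc, hcd, if_pos, hrel, List.filter_map,
            Function.comp_def]
          rw [List.filter_congr (fun p _ => ?_)]
          by_cases h : p.1 = x.1 <;> simp [h, hk]
        · rw [PySem.Dict.insert, PySem.Dict.insert, hc, if_neg (by simp [hcd]),
            if_neg (by simp [hcd])]
          simp [hrel, hk]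
      · simp only [hk, if_neg, Bool.false_eq_true, not_false_iff]
        apply ih
        by_cases hcd : d.contains x.1 = true
        · simp only [PySem.Dict.insert, hcd, if_pos, hrel, List.filter_map, Function.comp_def]
          rw [List.filter_congr (fun p _ => ?_)]
          · rw [List.map_congr_left (fun p hp => ?_), List.map_id]
            have := (List.mem_filter.mp hp).2
            have h : p.1 ≠ x.1 := by
              intro h; rw [h] at this; simp [hk] at this
            simp [h]
          · by_cases h : p.1 = x.1 <;> simp [h, hk]
        · rw [PySem.Dict.insert, if_neg (by simp [hcd])]
          simp [hrel, hk]

-- ofList is the insertion fold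
theorem ofList_eq_fold (b : List (String × Int)) :
    PySem.Dict.ofList b = b.foldl (fun m kv => m.insert kv.1 kv.2) PySem.Dict.empty := by
  rfl

-- the two exclusion tests agree
theorem keep_eq (t : List (String × Int)) (k : String) :
    (!(pvMetaList ++ t.map Prod.fst).contains k)
      = (!pvMetaList.contains k && !(PySem.Dict.mk t).contains k) := by
  have h : ((t.map Prod.fst).contains k) = (PySem.Dict.mk t).contains k := by
    simp only [PySem.Dict.contains]
    induction t with
    | nil => rfl
    | cons x xs ih =>
        simp only [List.map_cons, List.contains_cons, List.any_cons, ih]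
        congr 1
        rw [Bool.eq_iff_iff]
        constructor
        · intro hh; exact beq_iff_eq.mpr (eq_of_beq hh).symm
        · intro hh; exact beq_iff_eq.mpr (eq_of_beq hh).symm
  rw [List.contains_append, h, Bool.not_or]

-- ===== VERDICT (by name: the statement is the Claim_ definition above) =====
theorem get_missing_features_spec : Claim_equal_get_missing_features := by
  intro b t _
  show get_missing_features b t = get_missing_features_alt b t
  unfold get_missing_features get_missing_features_alt
  rw [a_body_eq t, erase_foldl_items, ofList_eq_fold]
  rw [insert_fold_filter (fun k => !pvMetaList.contains k && !(PySem.Dict.mk t).contains k)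
    b PySem.Dict.empty PySem.Dict.empty (by rfl)]
  apply List.filter_congr
  intro p _
  exact (keep_eq t p.1).symm
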